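-- pv_equiv track=rewrite | github.com/dalehagglund/everybody-codes-2025 | ec06/ec06.py | part1
-- ===== SOURCE A (Python) =====
-- def part1(input):
--     mentors = 0
--     pairs = 0
--     for ch in input:
--         if ch not in "aA": continue
--         if ch == "A":
--             mentors += 1
--         else:
--             pairs += mentors
--     return pairs
-- ===== SOURCE B (Python) =====
-- def part1(input):
--     total_a = sum(1 for ch in input if ch == 'a')
--     seen_a = 0
--     pairs = 0
--     for ch in input:
--         if ch == 'A':
--             pairs += total_a - seen_a
--         elif ch == 'a':
--             seen_a += 1
--     return pairs
-- ===== Notes on version B (the rewrite author's own statement) =====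
-- stated objective: alternative
-- what changed: B first precomputes the total number of 'a' characters, then counts from the 'A' side (each 'A' contributes the number of 'a's after it, computed as total_a minus the running prefix count), instead of A's single pass that adds the running mentor count at each 'a'.
import Mathlib
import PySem

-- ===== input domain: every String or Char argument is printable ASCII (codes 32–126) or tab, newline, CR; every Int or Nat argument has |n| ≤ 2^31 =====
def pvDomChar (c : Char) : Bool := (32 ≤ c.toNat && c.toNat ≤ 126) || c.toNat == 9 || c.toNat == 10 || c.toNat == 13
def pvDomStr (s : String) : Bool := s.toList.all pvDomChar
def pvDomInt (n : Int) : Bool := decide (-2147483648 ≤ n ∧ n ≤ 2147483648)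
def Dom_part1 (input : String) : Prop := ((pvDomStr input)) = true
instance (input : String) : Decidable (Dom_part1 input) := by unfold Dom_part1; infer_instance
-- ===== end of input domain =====

-- B counts pairs from the 'A' side using a precomputed total of 'a's instead of A's running mentor count; same O(n) cost, different decomposition.

-- ===== PORT A =====
-- one pass: mentors counts 'A' seen so far; each 'a' adds the current mentor count
def part1_go : List Char → Int → Int → Int
  | [], _, pairs => pairs
  | ch :: rest, mentors, pairs =>
    if ¬ (ch = 'a' ∨ ch = 'A') then part1_go rest mentors pairs
    else if ch = 'A' then part1_go rest (mentors + 1) pairs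
    else part1_go rest mentors (pairs + mentors)

def part1 (input : String) : Int := part1_go input.toList 0 0

-- ===== PORT B =====
-- first pass: total_a = sum(1 for ch in input if ch == 'a')
def part1_alt_total : List Char → Int → Int
  | [], acc => acc
  | ch :: rest, acc => part1_alt_total rest (if ch = 'a' then acc + 1 else acc)

-- second pass: each 'A' contributes total_a - seen_a
def part1_alt_go (total_a : Int) : List Char → Int → Int → Int
  | [], _, pairs => pairs
  | ch :: rest, seen_a, pairs =>
    if ch = 'A' then part1_alt_go total_a rest seen_a (pairs + (total_a - seen_a))
    else if ch = 'a' then part1_alt_go total_a rest (seen_a + 1) pairs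
    else part1_alt_go total_a rest seen_a pairs

def part1_alt (input : String) : Int :=
  part1_alt_go (part1_alt_total input.toList 0) input.toList 0 0

-- ===== PRECONDITION & SPEC =====
def Spec_part1 (input : String) (out : Int) : Prop := out = part1_alt input
instance (input : String) (out : Int) : Decidable (Spec_part1 input out) := by unfold Spec_part1; infer_instance

-- ===== CLAIM (what is proved, stated in full; the proofs are below) =====
def Claim_equal_part1 : Prop := ∀ (input : String), Dom_part1 input → Spec_part1 input (part1 input)

-- ===== LEMMAS AND PROOFS =====

-- number of 'a' in a list, as an Int
def caI : List Char → Int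
  | [] => 0
  | c :: cs => (if c = 'a' then 1 else 0) + caI cs

-- number of ('A' before 'a') pairs
def crossI : List Char → Int
  | [] => 0
  | c :: cs => (if c = 'A' then caI cs else 0) + crossI cs

theorem total_eq_caI (l : List Char) : ∀ acc, part1_alt_total l acc = acc + caI l := by
  induction l with
  | nil => intro acc; simp [part1_alt_total, caI]
  | cons c cs ih =>
    intro acc
    by_cases h : c = 'a' <;> simp [part1_alt_total, caI, h, ih] <;> ring

theorem part1_go_eq (l : List Char) :
    ∀ m p, part1_go l m p = p + m * caI l + crossI l := by
  induction l with
  | nil => intro m p; simp [part1_go, caI, crossI]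
  | cons c cs ih =>
    intro m p
    by_cases ha : c = 'a'
    · have hA : ¬ c = 'A' := by subst ha; decide
      simp [part1_go, ha, hA, caI, crossI, ih]; ring
    · by_cases hA : c = 'A'
      · simp [part1_go, ha, hA, caI, crossI, ih]; ring
      · simp [part1_go, ha, hA, caI, crossI, ih]

-- cAI = number of 'A'
def cAI : List Char → Int
  | [] => 0
  | c :: cs => (if c = 'A' then 1 else 0) + cAI cs

theorem part1_alt_go_eq (t : Int) (l : List Char) :
    ∀ sa p, part1_alt_go t l sa p = p + cAI l * (t - sa) - cAI l * caI l + crossI l := by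
  induction l with
  | nil => intro sa p; simp [part1_alt_go, cAI, caI, crossI]
  | cons c cs ih =>
    intro sa p
    by_cases hA : c = 'A'
    · have ha : ¬ c = 'a' := by subst hA; decide
      simp [part1_alt_go, hA, ha, cAI, caI, crossI, ih]; ring
    · by_cases ha : c = 'a'
      · simp [part1_alt_go, hA, ha, cAI, caI, crossI, ih]; ring
      · simp [part1_alt_go, hA, ha, cAI, caI, crossI, ih]

-- ===== VERDICT (by name: the statement is the Claim_ definition above) =====
theorem part1_spec : Claim_equal_part1 := by
  intro input _
  unfold Spec_part1 part1 part1_alt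
  rw [total_eq_caI, part1_go_eq, part1_alt_go_eq]
  ring
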